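-- pv_equiv track=rewrite | github.com/mamimia/ihouse-core | src/adapters/ota/idempotency_monitor.py | _classify_dlq_rows
-- ===== SOURCE A (Python) =====
-- IDEMPOTENCY_REJECTION_CODES: frozenset = frozenset({
--     "ALREADY_APPLIED",
--     "ALREADY_EXISTS",
--     "ALREADY_EXISTS_BUSINESS",
--     "DUPLICATE",
-- })
--
-- _APPLIED_STATUSES: frozenset = frozenset({
--     "APPLIED",
--     "ALREADY_APPLIED",
--     "ALREADY_EXISTS",
--     "ALREADY_EXISTS_BUSINESS",
-- })
--
-- def _classify_dlq_rows(rows: list) -> tuple[int, int, int, int]: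
--     """
--     Classify DLQ rows into metric buckets.
--
--     Returns:
--         (total, pending, already_applied, idempotency_rejection_count)
--     """
--     total = len(rows)
--     pending = 0
--     already_applied = 0
--     idempotency_rejections = 0
--
--     for row in rows:
--         replay_result = row.get("replay_result")
--         rejection_code = row.get("rejection_code") or ""
--
--         if replay_result in _APPLIED_STATUSES:
--             already_applied += 1
--         else:
--             pending += 1
--
--         if rejection_code in IDEMPOTENCY_REJECTION_CODES:
--             idempotency_rejections += 1
--
--     return total, pending, already_applied, idempotency_rejections
-- ===== SOURCE B (Python) =====
-- IDEMPOTENCY_REJECTION_CODES: frozenset = frozenset({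
--     "ALREADY_APPLIED",
--     "ALREADY_EXISTS",
--     "ALREADY_EXISTS_BUSINESS",
--     "DUPLICATE",
-- })
--
-- _APPLIED_STATUSES: frozenset = frozenset({
--     "APPLIED",
--     "ALREADY_APPLIED",
--     "ALREADY_EXISTS",
--     "ALREADY_EXISTS_BUSINESS",
-- })
--
--
-- def _tally(values):
--     """Frequency dictionary of an iterable."""
--     counts = {}
--     for v in values:
--         counts[v] = counts.get(v, 0) + 1
--     return counts
--
--
-- def _classify_dlq_rows(rows: list) -> tuple[int, int, int, int]:
--     """Tally statuses/codes into frequency dicts, then sum the relevant buckets."""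
--     total = len(rows)
--     replay_counts = _tally(row.get("replay_result") for row in rows)
--     rejection_counts = _tally((row.get("rejection_code") or "") for row in rows)
--     already_applied = sum(replay_counts.get(s, 0) for s in _APPLIED_STATUSES)
--     idempotency_rejections = sum(
--         rejection_counts.get(c, 0) for c in IDEMPOTENCY_REJECTION_CODES
--     )
--     return total, total - already_applied, already_applied, idempotency_rejections
-- ===== Notes on version B (the rewrite author's own statement) =====
-- stated objective: alternative
-- what changed: Instead of A's single fused loop with three branchy counters, B builds frequency dictionaries (tallies) of the replay statuses and rejection codes, then computes already_applied and idempotency_rejections by summing only the four relevant buckets of each tally, with pending derived as total - already_applied.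
import Mathlib
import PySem

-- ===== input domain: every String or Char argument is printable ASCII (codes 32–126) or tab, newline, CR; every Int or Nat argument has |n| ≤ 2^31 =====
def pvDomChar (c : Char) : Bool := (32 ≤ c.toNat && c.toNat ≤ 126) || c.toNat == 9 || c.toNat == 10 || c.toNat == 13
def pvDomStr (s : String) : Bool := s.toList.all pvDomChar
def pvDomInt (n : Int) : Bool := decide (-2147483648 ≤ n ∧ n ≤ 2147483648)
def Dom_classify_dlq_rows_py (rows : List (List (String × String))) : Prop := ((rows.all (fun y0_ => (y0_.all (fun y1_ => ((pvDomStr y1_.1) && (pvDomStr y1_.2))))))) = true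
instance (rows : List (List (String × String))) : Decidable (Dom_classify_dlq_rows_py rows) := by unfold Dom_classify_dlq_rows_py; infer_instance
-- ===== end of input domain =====

-- B replaces A's fused per-row branchy loop by frequency dictionaries (tallies) of the
-- statuses/codes, summing the four relevant buckets; pending = total - already_applied
-- (objective: alternative).

-- module constants (frozensets), as lists of their distinct elements
def idempotencyRejectionCodes : PySem.Set String :=
  PySem.Set.ofList ["ALREADY_APPLIED", "ALREADY_EXISTS", "ALREADY_EXISTS_BUSINESS", "DUPLICATE"]

def appliedStatuses : PySem.Set String :=
  PySem.Set.ofList ["APPLIED", "ALREADY_APPLIED", "ALREADY_EXISTS", "ALREADY_EXISTS_BUSINESS"]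

-- ===== PORT A =====
-- one fold carrying (pending, already_applied, idempotency_rejections); row.get = first-match assoc lookup
def classify_dlq_rows_py (rows : List (List (String × String))) : Int × Int × Int × Int :=
  let total : Int := rows.length
  let st := rows.foldl (fun (st : Int × Int × Int) row =>
    let replay_result := List.lookup "replay_result" row
    let rejection_code := (List.lookup "rejection_code" row).getD ""   -- `or ""`: None → ""
    let st :=
      if (match replay_result with
          | some v => PySem.Set.contains appliedStatuses v
          | none => false) then (st.1, st.2.1 + 1, st.2.2)
      else (st.1 + 1, st.2.1, st.2.2)
    if PySem.Set.contains idempotencyRejectionCodes rejection_code then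
      (st.1, st.2.1, st.2.2 + 1)
    else st) (0, 0, 0)
  (total, st.1, st.2.1, st.2.2)

-- ===== PORT B =====
-- _tally: counts[v] = counts.get(v, 0) + 1 over the iterable
def tallyB {K : Type} [BEq K] (vs : List K) : PySem.Dict K Int :=
  vs.foldl (fun d v => d.insert v (d.getD v 0 + 1)) PySem.Dict.empty

def classify_dlq_rows_py_alt (rows : List (List (String × String))) : Int × Int × Int × Int :=
  let total : Int := rows.length
  let replay_counts := tallyB (rows.map (fun row => List.lookup "replay_result" row))
  let rejection_counts := tallyB (rows.map (fun row => (List.lookup "rejection_code" row).getD ""))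
  let already_applied : Int :=
    (appliedStatuses.map (fun s => replay_counts.getD (some s) 0)).sum
  let idempotency_rejections : Int :=
    (idempotencyRejectionCodes.map (fun c => rejection_counts.getD c 0)).sum
  (total, total - already_applied, already_applied, idempotency_rejections)

-- ===== PRECONDITION & SPEC =====
def Spec_classify_dlq_rows_py (rows : List (List (String × String))) (out : Int × Int × Int × Int) : Prop := out = classify_dlq_rows_py_alt rows
instance (rows : List (List (String × String))) (out : Int × Int × Int × Int) : Decidable (Spec_classify_dlq_rows_py rows out) := by unfold Spec_classify_dlq_rows_py; infer_instance

-- ===== CLAIM (what is proved, stated in full; the proofs are below) =====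
def Claim_equal_classify_dlq_rows_py : Prop := ∀ (rows : List (List (String × String))), Dom_classify_dlq_rows_py rows → Spec_classify_dlq_rows_py rows (classify_dlq_rows_py rows)

-- ===== LEMMAS AND PROOFS =====

-- predicates describing what A counts per row
def rowAlreadyApplied (row : List (String × String)) : Bool :=
  match List.lookup "replay_result" row with
  | some v => PySem.Set.contains appliedStatuses v
  | none => false

def rowIdemRejected (row : List (String × String)) : Bool :=
  PySem.Set.contains idempotencyRejectionCodes ((List.lookup "rejection_code" row).getD "")

-- A's fold, characterised: starting from (p, a, r) it adds the not-applied count, the applied count and the rejection count.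
theorem foldA_eq (rows : List (List (String × String))) (p a r : Int) :
    rows.foldl (fun (st : Int × Int × Int) row =>
      let replay_result := List.lookup "replay_result" row
      let rejection_code := (List.lookup "rejection_code" row).getD ""
      let st :=
        if (match replay_result with
            | some v => PySem.Set.contains appliedStatuses v
            | none => false) then (st.1, st.2.1 + 1, st.2.2)
        else (st.1 + 1, st.2.1, st.2.2)
      if PySem.Set.contains idempotencyRejectionCodes rejection_code then
        (st.1, st.2.1, st.2.2 + 1)
      else st) (p, a, r)
    = (p + rows.countP (fun row => !rowAlreadyApplied row),
       a + rows.countP rowAlreadyApplied,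
       r + rows.countP rowIdemRejected) := by
  induction rows generalizing p a r with
  | nil => simp
  | cons row rest ih =>
    simp only [List.foldl_cons, List.countP_cons]
    cases h1 : rowAlreadyApplied row <;> cases h2 : rowIdemRejected row <;>
      have h1' := h1 <;> have h2' := h2 <;>
      unfold rowAlreadyApplied at h1' <;> unfold rowIdemRejected at h2' <;>
      simp only [h1', h2', Bool.false_eq_true, if_false, if_true, ih,
        Bool.not_true, Bool.not_false, Prod.mk.injEq] <;>
      push_cast <;> omega

-- tallyB looked up with default 0 is the multiplicity of the key
theorem tallyB_getD {K : Type} [BEq K] [LawfulBEq K] (vs : List K) (k : K) :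
    (tallyB vs).getD k 0 = (vs.count k : Int) := by
  unfold tallyB
  rw [PySem.Dict.getD_foldl_insert_add_one]
  simp

-- summing an indicator over a nodup key list
theorem sum_indicator {K : Type} [BEq K] [LawfulBEq K] (ks : List K) (hnd : ks.Nodup) (v : K) :
    (ks.map (fun k => if v == k then (1 : Nat) else 0)).sum
      = if ks.contains v then 1 else 0 := by
  induction ks with
  | nil => simp
  | cons k ks ih =>
    rcases List.nodup_cons.mp hnd with ⟨hk, hnd'⟩
    by_cases hv : v = k
    · subst hv
      simp [ih hnd', hk]
    · simp [hv, ih hnd']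

-- one more element in vs shifts each bucket by the indicator
theorem sum_map_count_cons {K : Type} [BEq K] [LawfulBEq K] (ks : List K) (v : K) (vs : List K) :
    (ks.map (fun k => (v :: vs).count k)).sum
      = (ks.map (fun k => vs.count k)).sum
        + (ks.map (fun k => if v == k then (1 : Nat) else 0)).sum := by
  induction ks with
  | nil => simp
  | cons k ks ihk =>
    simp only [List.map_cons, List.sum_cons]
    rw [List.count_cons, ihk]
    split_ifs <;> omega

-- summing multiplicities over a nodup key list counts membership
theorem sum_count {K : Type} [BEq K] [LawfulBEq K] (ks : List K) (hnd : ks.Nodup) (vs : List K) :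
    (ks.map (fun k => vs.count k)).sum = vs.countP (fun v => ks.contains v) := by
  induction vs with
  | nil => simp
  | cons v vs ih =>
    simp only [List.countP_cons]
    rw [sum_map_count_cons, ih, sum_indicator ks hnd v]

-- cast the counting identity to Int
theorem sum_count_int {K : Type} [BEq K] [LawfulBEq K] (ks : List K) (hnd : ks.Nodup) (vs : List K) :
    (ks.map (fun k => ((vs.count k : Nat) : Int))).sum
      = (vs.countP (fun v => ks.contains v) : Int) := by
  rw [← sum_count ks hnd vs, Nat.cast_list_sum, List.map_map]
  rfl

-- membership of an Option in a some-image list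
theorem contains_map_some (l : List String) (o : Option String) :
    (l.map some).contains o = (match o with | some v => l.contains v | none => false) := by
  induction l with
  | nil => cases o <;> simp
  | cons x l ih =>
    cases o with
    | none => simp
    | some v => simp [List.contains_cons, ih]

theorem sum_applied (rows : List (List (String × String))) :
    ((appliedStatuses : List String).map
        (fun s => (((rows.map (fun row => List.lookup "replay_result" row)).count (some s) : Nat) : Int))).sum
      = (rows.countP rowAlreadyApplied : Int) := by
  have h := sum_count_int ((appliedStatuses : List String).map some) (by decide)
      (rows.map (fun row => List.lookup "replay_result" row))
  rw [List.countP_map] at h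
  have hpred : ∀ row ∈ rows,
      ((fun v => List.contains ((appliedStatuses : List String).map some) v)
        ∘ (fun row => List.lookup "replay_result" row)) row = rowAlreadyApplied row := by
    intro row _
    simp only [Function.comp_apply]
    rw [contains_map_some]
    unfold rowAlreadyApplied
    cases List.lookup "replay_result" row <;> simp
  rw [List.countP_congr (q := rowAlreadyApplied) (fun row hr => by rw [hpred row hr])] at h
  simpa [List.map_map, Function.comp_def] using h

theorem sum_rejected (rows : List (List (String × String))) :
    ((idempotencyRejectionCodes : List String).map
        (fun c => (((rows.map (fun row => (List.lookup "rejection_code" row).getD "")).count c : Nat) : Int))).sum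
      = (rows.countP rowIdemRejected : Int) := by
  have h := sum_count_int (idempotencyRejectionCodes : List String) (by decide)
      (rows.map (fun row => (List.lookup "rejection_code" row).getD ""))
  rw [List.countP_map] at h
  have hpred : ∀ row ∈ rows,
      ((fun v => List.contains (idempotencyRejectionCodes : List String) v)
        ∘ (fun row => (List.lookup "rejection_code" row).getD "")) row = rowIdemRejected row := by
    intro row _
    simp only [Function.comp_apply]
    unfold rowIdemRejected
    simp
  rw [List.countP_congr (q := rowIdemRejected) (fun row hr => by rw [hpred row hr])] at h
  exact h

-- ===== VERDICT (by name: the statement is the Claim_ definition above) =====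
theorem classify_dlq_rows_py_spec : Claim_equal_classify_dlq_rows_py := by
  intro rows _
  unfold Spec_classify_dlq_rows_py classify_dlq_rows_py classify_dlq_rows_py_alt
  simp only [foldA_eq, tallyB_getD]
  rw [sum_applied, sum_rejected]
  have hnot : (rows.countP (fun row => !rowAlreadyApplied row) : Int)
      = (rows.length : Int) - rows.countP rowAlreadyApplied := by
    have h := List.length_eq_countP_add_countP (p := rowAlreadyApplied) (l := rows)
    have h2 : rows.countP (fun row => !rowAlreadyApplied row)
        = rows.countP (fun a => decide ¬(rowAlreadyApplied a = true)) := by simp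
    rw [h2]; omega
  rw [hnot]
  ring_nf
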